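-- pv_equiv track=rewrite | github.com/foreverxujiahuan/algorithm | 竞赛/A339/B.py | findMatrix
-- ===== SOURCE A (Python) =====
-- from collections import Counter
-- from typing import List
--
-- def findMatrix(nums: List[int]) -> List[List[int]]:
--     counter = Counter(nums)
--     matrix = []
--     cnt = len(nums)
--     while cnt:
--         cur = []
--         for k, v in counter.items():
--             if v > 0:
--                 cur.append(k)
--                 counter[k] -= 1
--                 cnt -= 1
--         matrix.append(cur)
--     return matrix
-- ===== SOURCE B (Python) =====
-- from collections import Counter
-- from typing import List
--
--
-- def findMatrix(nums: List[int]) -> List[List[int]]: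
--     counts = Counter(nums)
--     m = max(counts.values(), default=0)
--     return [[k for k, c in counts.items() if c > i] for i in range(m)]
-- ===== Notes on version B (the rewrite author's own statement) =====
-- stated objective: simpler
-- what changed: Instead of repeatedly sweeping and destructively decrementing the Counter while a remaining-element count is nonzero, B computes the number of rows (the maximum multiplicity) once and builds each row i directly as the keys whose count exceeds i.
import Mathlib
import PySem

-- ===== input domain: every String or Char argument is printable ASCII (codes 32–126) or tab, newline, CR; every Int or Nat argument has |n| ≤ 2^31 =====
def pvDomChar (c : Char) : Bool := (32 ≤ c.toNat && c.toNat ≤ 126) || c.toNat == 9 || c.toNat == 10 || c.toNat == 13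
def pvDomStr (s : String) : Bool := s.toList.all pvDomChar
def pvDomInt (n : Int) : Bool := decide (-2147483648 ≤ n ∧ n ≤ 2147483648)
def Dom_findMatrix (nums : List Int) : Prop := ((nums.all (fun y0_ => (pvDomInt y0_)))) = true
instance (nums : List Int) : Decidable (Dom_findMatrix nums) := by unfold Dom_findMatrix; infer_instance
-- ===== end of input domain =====

-- B computes the row count (the maximum multiplicity) once and builds each row directly as
-- the keys whose count exceeds the row index, instead of A's destructive repeated sweeps.

-- ===== PORT A =====
-- One pass of A's `for k, v in counter.items():` body.  Exact: Python visits each key of the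
-- dict view once, and `counter[k] -= 1` overwrites in place the value of the key just read
-- (insertion order kept, later reads unaffected), so the pass reads the item list left to
-- right and rebuilds it; it returns (cur, updated items, number of `cnt -= 1` decrements).
def passA : List (Int × Int) → List Int × List (Int × Int) × Int
  | [] => ([], [], 0)
  | (k, v) :: rest =>
    let r := passA rest
    if 0 < v then (k :: r.1, (k, v - 1) :: r.2.1, r.2.2 + 1)
    else (r.1, (k, v) :: r.2.1, r.2.2)

-- A's `while cnt:` loop.  Fuel: every iteration entered with cnt ≠ 0 decrements cnt (= the
-- number of still-undistributed elements, initially len(nums)) by at least 1, so len(nums)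
-- iterations always suffice; exhausted fuel and the cnt = 0 exit both return the same [].
def loopA : Nat → List (Int × Int) → Int → List (List Int)
  | 0, _, _ => []
  | fuel + 1, counter, cnt =>
    if cnt = 0 then []
    else
      let r := passA counter
      r.1 :: loopA fuel r.2.1 (cnt - r.2.2)

def findMatrix (nums : List Int) : List (List Int) :=
  loopA nums.length (PySem.Dict.counter nums).items (nums.length : Int)

-- ===== PORT B =====
def findMatrix_alt (nums : List Int) : List (List Int) :=
  let counts := PySem.Dict.counter nums
  let m : Int :=
    match PySem.List.max? counts.values (fun v => v) with
    | some v => v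
    | none => 0
  (PySem.List.pyRange 0 m 1).map (fun i =>
    (counts.items.filter (fun p => decide (p.2 > i))).map (fun p => p.1))

-- ===== PRECONDITION & SPEC =====
def Spec_findMatrix (nums : List Int) (out : List (List Int)) : Prop := out = findMatrix_alt nums
instance (nums : List Int) (out : List (List Int)) : Decidable (Spec_findMatrix nums out) := by unfold Spec_findMatrix; infer_instance

-- ===== CLAIM (what is proved, stated in full; the proofs are below) =====
def Claim_equal_findMatrix : Prop := ∀ (nums : List Int), Dom_findMatrix nums → Spec_findMatrix nums (findMatrix nums)

-- ===== LEMMAS AND PROOFS =====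

def dec1 (v : Int) : Int := if 0 < v then v - 1 else v
theorem passA_eq (d : List (Int × Int)) :
    passA d = ((d.filter fun p => decide (0 < p.2)).map Prod.fst,
      d.map (fun p => (p.1, dec1 p.2)),
      (((d.filter fun p => decide (0 < p.2)).length : Int))) := by
  induction d with
  | nil => rfl
  | cons p rest ih =>
    obtain ⟨k, v⟩ := p
    simp only [passA, ih, dec1, List.filter_cons, List.map_cons]
    by_cases h : 0 < v <;> simp [h]
theorem sum_map_dec1 (l : List Int) :
    (l.map dec1).sum = l.sum - ((l.filter fun v => decide (0 < v)).length : Int) := by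
  induction l with
  | nil => simp
  | cons v t ih =>
    simp only [List.map_cons, List.sum_cons, List.filter_cons, dec1]
    by_cases h : 0 < v <;> simp [h, ih] <;> ring
theorem dec1_max (a b : Int) (_ha : 0 ≤ a) (_hb : 0 ≤ b) :
    dec1 (max a b) = max (dec1 a) (dec1 b) := by
  unfold dec1; split_ifs <;> omega
theorem foldl_max_dec1 (l : List Int) : ∀ a : Int, 0 ≤ a → (∀ v ∈ l, 0 ≤ v) →
    (l.map dec1).foldl max (dec1 a) = dec1 (l.foldl max a) := by
  induction l with
  | nil => intro a _ _; rfl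
  | cons v t ih =>
    intro a ha hl
    have hv : 0 ≤ v := hl v (by simp)
    simp only [List.map_cons, List.foldl_cons]
    rw [← dec1_max a v ha hv]
    exact ih (max a v) (le_trans ha (le_max_left a v)) (fun w hw => hl w (by simp [hw]))
theorem foldl_max_nonpos (l : List Int) : ∀ a : Int, a ≤ 0 → (∀ v ∈ l, v ≤ 0) →
    l.foldl max a ≤ 0 := by
  induction l with
  | nil => intro a ha _; simpa using ha
  | cons v t ih =>
    intro a ha hl
    simp only [List.foldl_cons]
    exact ih (max a v) (by have := hl v (by simp); omega) (fun w hw => hl w (by simp [hw]))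
theorem le_foldl_max' (l : List Int) : ∀ (a v : Int), v ∈ l → v ≤ l.foldl max a := by
  induction l with
  | nil => intro _ _ h; cases h
  | cons w t ih =>
    intro a v hv
    simp only [List.foldl_cons]
    rcases List.mem_cons.1 hv with h | h
    · subst h
      have haux : ∀ (s : List Int) (b : Int), b ≤ s.foldl max b := by
        intro s
        induction s with
        | nil => simp
        | cons x u ihu => intro b; exact le_trans (le_max_left b x) (ihu (max b x))
      exact le_trans (le_max_right a v) (haux t (max a v))
    · exact ih (max a w) v h
theorem rows_nil (d : List (Int × Int)) (h : ∀ p ∈ d, 0 ≤ p.2)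
    (hs : (d.map Prod.snd).sum ≤ 0) :
    (List.range ((d.map Prod.snd).foldl max 0).toNat).map (fun (i : Nat) =>
        (d.filter fun p => decide ((i : Int) < p.2)).map Prod.fst) = [] := by
  have h0 : ∀ v ∈ d.map Prod.snd, v ≤ 0 := by
    intro v hv
    have hnn : ∀ x ∈ d.map Prod.snd, (0:Int) ≤ x := by
      intro x hx; obtain ⟨p, hp, rfl⟩ := List.mem_map.1 hx; exact h p hp
    have := List.single_le_sum hnn v hv
    omega
  have hm : ((d.map Prod.snd).foldl max 0).toNat = 0 := by
    have := foldl_max_nonpos (d.map Prod.snd) 0 le_rfl h0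
    omega
  simp [hm]

theorem loopA_spec (fuel : Nat) : ∀ d : List (Int × Int), (∀ p ∈ d, 0 ≤ p.2) →
    (d.map Prod.snd).sum ≤ (fuel : Int) →
    loopA fuel d ((d.map Prod.snd).sum) =
      (List.range ((d.map Prod.snd).foldl max 0).toNat).map (fun (i : Nat) =>
        (d.filter fun p => decide ((i : Int) < p.2)).map Prod.fst) := by
  induction fuel with
  | zero =>
    intro d h hs
    rw [rows_nil d h (by exact_mod_cast hs)]
    rfl
  | succ fuel ih =>
    intro d h hs
    by_cases hz : (d.map Prod.snd).sum = 0
    · rw [rows_nil d h (le_of_eq hz)]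
      simp [loopA, hz]
    · -- sum positive
      have hnn : ∀ x ∈ d.map Prod.snd, (0:Int) ≤ x := by
        intro x hx; obtain ⟨p, hp, rfl⟩ := List.mem_map.1 hx; exact h p hp
      have hpos : 0 < (d.map Prod.snd).sum :=
        lt_of_le_of_ne (List.sum_nonneg hnn) (Ne.symm hz)
      -- some value is positive
      have hex : ∃ v ∈ d.map Prod.snd, 0 < v := by
        by_contra hc
        rw [not_exists] at hc
        simp only [not_and, not_lt] at hc
        have hsn : ∀ l : List Int, (∀ x ∈ l, x ≤ 0) → l.sum ≤ 0 := by
          intro l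
          induction l with
          | nil => simp
          | cons x t iht =>
            intro hl
            simp only [List.sum_cons]
            have := hl x (by simp)
            have := iht (fun y hy => hl y (by simp [hy]))
            omega
        have := hsn _ (fun x hx => by have := hc x hx; omega)
        omega
      obtain ⟨v0, hv0m, hv0⟩ := hex
      -- number of positives ≥ 1
      have hflt : 0 < ((d.filter fun p => decide (0 < p.2)).length) := by
        obtain ⟨p0, hp0, rfl⟩ := List.mem_map.1 hv0m
        have : p0 ∈ d.filter fun p => decide (0 < p.2) :=
          List.mem_filter.2 ⟨hp0, by simpa using hv0⟩
        exact List.length_pos_of_mem this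
      set d' := d.map (fun p => (p.1, dec1 p.2)) with hd'
      have hsnd' : d'.map Prod.snd = (d.map Prod.snd).map dec1 := by
        simp [hd', List.map_map, Function.comp]
      have hfiltlen : ((d.map Prod.snd).filter fun v => decide (0 < v)).length
          = ((d.filter fun p => decide (0 < p.2)).length) := by
        rw [List.filter_map]
        simp only [List.length_map]
        rfl
      have hsum' : (d'.map Prod.snd).sum
          = (d.map Prod.snd).sum - ((d.filter fun p => decide (0 < p.2)).length : Int) := by
        rw [hsnd', sum_map_dec1, hfiltlen]
      have h' : ∀ p ∈ d', 0 ≤ p.2 := by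
        intro p hp
        obtain ⟨q, hq, rfl⟩ := List.mem_map.1 hp
        have := h q hq
        simp only [dec1]
        split <;> omega
      -- max value ≥ 1
      have hM : 1 ≤ (d.map Prod.snd).foldl max 0 :=
        le_trans hv0 (le_foldl_max' _ 0 v0 hv0m)
      have hM' : (d'.map Prod.snd).foldl max 0 = (d.map Prod.snd).foldl max 0 - 1 := by
        rw [hsnd']
        have hc := foldl_max_dec1 (d.map Prod.snd) 0 le_rfl hnn
        have h0 : dec1 0 = 0 := rfl
        rw [h0] at hc
        rw [hc]
        simp only [dec1]
        rw [if_pos (by omega)]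
      -- unfold loop once
      rw [loopA, if_neg hz]
      rw [passA_eq]
      have hcnt : (d.map Prod.snd).sum - ((d.filter fun p => decide (0 < p.2)).length : Int)
          = (d'.map Prod.snd).sum := hsum'.symm
      simp only [hcnt]
      rw [ih d' h' (by rw [hsum']; push_cast at hs ⊢; omega)]
      -- now align RHS
      have hnat : ((d.map Prod.snd).foldl max 0).toNat
          = ((d'.map Prod.snd).foldl max 0).toNat + 1 := by
        rw [hM']; omega
      rw [hnat, List.range_succ_eq_map, List.map_cons, List.map_map, List.map_map]
      congr 1
      apply List.map_congr_left
      intro a _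
      rw [hd', List.filter_map, List.map_map]
      have hfst : (Prod.fst ∘ fun p : Int × Int => (p.1, dec1 p.2)) = Prod.fst := rfl
      rw [hfst]
      congr 1
      apply List.filter_congr
      intro p hp
      have hp2 := h p hp
      show decide ((a : Int) < dec1 p.2) = decide ((Nat.succ a : Int) < p.2)
      rw [decide_eq_decide]
      unfold dec1
      split <;> omega


theorem length_eq_sum_counts (nums : List Int) :
    ((((PySem.Dict.counter nums).items).map Prod.snd).sum) = (nums.length : Int) := by
  rw [PySem.Dict.items_counter, List.map_map]
  have hcomp : (Prod.snd ∘ fun k : Int => (k, (nums.count k : Int)))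
      = (fun k : Int => ((nums.count k : Nat) : Int)) := rfl
  rw [hcomp]
  have hperm : (PySem.Set.ofList nums).Perm nums.dedup := by
    refine (List.perm_ext_iff_of_nodup (PySem.Set.nodup_ofList nums) nums.nodup_dedup).2 ?_
    intro a
    rw [PySem.Set.mem_ofList, List.mem_dedup]
  rw [(hperm.map _).sum_eq]
  have : (nums.dedup.map fun k => ((nums.count k : Nat) : Int))
      = (nums.dedup.map fun k => nums.count k).map (Nat.cast) := by
    rw [List.map_map]; rfl
  rw [this, ← Nat.cast_list_sum, List.sum_map_count_dedup_eq_length]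

theorem maxD_eq_foldl (l : List Int) (h : ∀ v ∈ l, 0 ≤ v) :
    (match PySem.List.max? l (fun v => v) with | some v => v | none => (0:Int)) = l.foldl max 0 := by
  cases l with
  | nil => rfl
  | cons x t =>
    rw [PySem.List.max?_id_cons]
    simp only [List.foldl_cons]
    rw [max_eq_right (h x (by simp))]

theorem alt_eq_spec (nums : List Int) :
    findMatrix_alt nums =
      (List.range (((((PySem.Dict.counter nums).items).map Prod.snd)).foldl max 0).toNat).map
        (fun (i : Nat) => (((PySem.Dict.counter nums).items).filter fun p => decide ((i : Int) < p.2)).map Prod.fst) := by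
  have hvals : (PySem.Dict.counter nums).values = ((PySem.Dict.counter nums).items).map Prod.snd := rfl
  have hnn : ∀ v ∈ ((PySem.Dict.counter nums).items).map Prod.snd, (0:Int) ≤ v := by
    rw [PySem.Dict.items_counter, List.map_map]
    intro v hv
    obtain ⟨k, _, rfl⟩ := List.mem_map.1 hv
    exact Int.natCast_nonneg _
  show (PySem.List.pyRange 0 _ 1).map _ = _
  rw [hvals, maxD_eq_foldl _ hnn, PySem.List.pyRange_one, List.map_map, sub_zero]
  apply List.map_congr_left
  intro a _
  simp only [Function.comp_apply, zero_add, gt_iff_lt]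

-- ===== VERDICT (by name: the statement is the Claim_ definition above) =====
theorem findMatrix_spec : Claim_equal_findMatrix := by
  intro nums _
  unfold Spec_findMatrix findMatrix
  have hpos : ∀ p ∈ (PySem.Dict.counter nums).items, 0 ≤ p.2 := by
    rw [PySem.Dict.items_counter]
    rintro p hp
    simp only [List.mem_map] at hp
    obtain ⟨k, _, rfl⟩ := hp
    exact Int.natCast_nonneg _
  have hsum := length_eq_sum_counts nums
  rw [← hsum, loopA_spec nums.length _ hpos (by rw [hsum]), alt_eq_spec]
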